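-- pv_equiv track=rewrite | github.com/Ruqing1963/Q47-Null-Sparse-Decomposition | count_effective_moduli.py | count_effective_moduli
-- ===== SOURCE A (Python) =====
-- def sieve_primes(n: int) -> list:
--     """Sieve of Eratosthenes up to n."""
--     is_prime = [True] * (n + 1)
--     is_prime[0] = is_prime[1] = False
--     for i in range(2, int(n**0.5) + 1):
--         if is_prime[i]:
--             for j in range(i * i, n + 1, i):
--                 is_prime[j] = False
--     return [i for i in range(2, n + 1) if is_prime[i]]
--
-- def count_effective_moduli(D: int) -> int:
--     """
--     Count integers q ∈ [1, D] all of whose prime factors are ≡ 1 (mod 47).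
--
--     Uses a sieve: start with all numbers marked as effective,
--     then unmark any number divisible by a non-effective prime.
--     """
--     is_eff = [True] * (D + 1)
--     is_eff[0] = False  # 0 is not a positive integer
--
--     primes = sieve_primes(D)
--     for p in primes:
--         if (p - 1) % 47 != 0:
--             # p is NOT an effective prime; remove all its multiples
--             for m in range(p, D + 1, p):
--                 is_eff[m] = False
--
--     return sum(is_eff)
-- ===== SOURCE B (Python) =====
-- def count_effective_moduli(D: int) -> int:
--     """
--     Count integers q in [1, D] all of whose prime factors are = 1 (mod 47),
--     by factoring each candidate directly by trial division (no sieve, no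
--     marking array): strip factors in increasing order and fail as soon as a
--     prime factor not congruent to 1 mod 47 appears.
--     """
--     def effective(q: int) -> bool:
--         d = 2
--         while d * d <= q:
--             if q % d == 0:
--                 if (d - 1) % 47 != 0:
--                     return False
--                 q //= d
--             else:
--                 d += 1
--         return q == 1 or (q - 1) % 47 == 0
--     return sum(1 for q in range(1, D + 1) if effective(q))
-- ===== Notes on version B (the rewrite author's own statement) =====
-- stated objective: alternative
-- what changed: Replaces the Eratosthenes prime sieve plus a marking array over [0,D] by a direct per-number trial-division factorization: each q in [1,D] is stripped of its prime factors in increasing order and rejected as soon as a factor not congruent to 1 mod 47 appears, so no sieve and no boolean arrays exist at all. Pre_ excludes D <= 0, where A raises IndexError while B's empty range returns 0.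
-- outside the precondition, e.g. on count_effective_moduli(0): A raises IndexError, B returns 0; on count_effective_moduli(-3): A raises IndexError, B returns 0
import Mathlib
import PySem

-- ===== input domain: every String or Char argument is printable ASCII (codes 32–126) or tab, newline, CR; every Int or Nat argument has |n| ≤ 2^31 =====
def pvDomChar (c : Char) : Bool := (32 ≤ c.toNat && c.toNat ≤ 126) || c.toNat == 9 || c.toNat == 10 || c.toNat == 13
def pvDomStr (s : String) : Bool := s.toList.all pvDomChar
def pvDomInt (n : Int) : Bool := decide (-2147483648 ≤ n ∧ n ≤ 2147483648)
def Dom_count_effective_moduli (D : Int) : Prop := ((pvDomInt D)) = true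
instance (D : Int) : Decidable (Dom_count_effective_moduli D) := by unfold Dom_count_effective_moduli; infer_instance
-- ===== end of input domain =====

-- B replaces A's Eratosthenes sieve + bad-prime marking array by a direct per-number
-- trial-division factorization of every candidate up to D (objective: alternative
-- algorithm; no speed claim is made — B does more arithmetic on large D).

-- ===== PORT A =====
-- int(n**0.5) is ported as Nat.sqrt on n.toNat: exact for the 0 ≤ n ≤ 2^31 this port is used with
def pvIsqrt (n : Int) : Int := (Nat.sqrt n.toNat : Int)

-- Python's mutable list of booleans is ported as Array Bool (constant-time writes, as in
-- CPython); every index the algorithm writes/reads is nonnegative and in range under Pre_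
def pvSet (a : Array Bool) (i : Int) (v : Bool) : Array Bool := a.setIfInBounds i.toNat v
def pvGet (a : Array Bool) (i : Int) : Bool := a.getD i.toNat false

def sieve_primes (n : Int) : List Int :=
  let is_prime := Array.replicate (n + 1).toNat true
  let is_prime := pvSet (pvSet is_prime 0 false) 1 false
  let is_prime := (PySem.List.pyRange 2 (pvIsqrt n + 1) 1).foldl
    (fun l i =>
      if pvGet l i then
        (PySem.List.pyRange (i * i) (n + 1) i).foldl
          (fun l' j => pvSet l' j false) l
      else l) is_prime
  (PySem.List.pyRange 2 (n + 1) 1).filter (fun i => pvGet is_prime i)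

def count_effective_moduli (D : Int) : Int :=
  let is_eff := Array.replicate (D + 1).toNat true
  let is_eff := pvSet is_eff 0 false
  let primes := sieve_primes D
  let is_eff := primes.foldl
    (fun l p =>
      if PySem.Int.mod (p - 1) 47 ≠ 0 then
        (PySem.List.pyRange p (D + 1) p).foldl
          (fun l' m => pvSet l' m false) l
      else l) is_eff
  is_eff.foldl (fun s b => s + (if b then 1 else 0)) 0

-- ===== PORT B =====
-- termination helper for effLoop: a positive integer shrinks under division by d > 1
theorem pvEdivLt (q d : Int) (h1 : 0 < q) (h2 : 1 < d) : q / d < q := by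
  rcases lt_or_ge (q / d) q with h | h
  · exact h
  · exfalso
    have h3 : q / d = q := le_antisymm (Int.ediv_le_self _ h1.le) h
    nlinarith [Int.emod_nonneg q (show d ≠ 0 by omega), Int.mul_ediv_add_emod q d]

-- the while loop of Source B's `effective`; the dite guard adds the invariants 2 ≤ d, 1 ≤ q
-- (true at every call site) to the loop condition d*d ≤ q only to justify termination
def effLoop (q d : Int) : Bool :=
  if h : 2 ≤ d ∧ 1 ≤ q ∧ d * d ≤ q then
    if PySem.Int.mod q d = 0 then
      if PySem.Int.mod (d - 1) 47 ≠ 0 then false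
      else effLoop (PySem.Int.floordiv q d) d
    else effLoop q (d + 1)
  else (q == 1 || PySem.Int.mod (q - 1) 47 == 0)
termination_by (q.toNat, (q - d).toNat)
decreasing_by
  · have hd : PySem.Int.floordiv q d = q / d := PySem.Int.floordiv_eq_ediv_of_pos (by omega)
    have h1 : q / d < q := pvEdivLt q d (by omega) (by omega)
    have h2 : 0 ≤ q / d := Int.ediv_nonneg (by omega) (by omega)
    left
    omega
  · have h3 : 2 * d ≤ d * d := by nlinarith
    right
    omega

def effective (q : Int) : Bool := effLoop q 2

def count_effective_moduli_alt (D : Int) : Int :=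
  (PySem.List.pyRange 1 (D + 1) 1).foldl (fun s q => if effective q then s + 1 else s) 0

-- ===== PRECONDITION & SPEC =====
-- Python A raises IndexError for every D ≤ 0 (the is_eff / sieve arrays are shorter
-- than the indices written), so exactly those inputs are excluded; B returns 0 there.
def Pre_count_effective_moduli (D : Int) : Prop := 1 ≤ D
instance (D : Int) : Decidable (Pre_count_effective_moduli D) := by unfold Pre_count_effective_moduli; infer_instance
def pvWitness_count_effective_moduli : Int := 5

def Spec_count_effective_moduli (D : Int) (out : Int) : Prop := out = count_effective_moduli_alt D
instance (D : Int) (out : Int) : Decidable (Spec_count_effective_moduli D out) := by unfold Spec_count_effective_moduli; infer_instance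

-- ===== CLAIM (what is proved, stated in full; the proofs are below) =====
def Claim_equal_count_effective_moduli : Prop := ∀ (D : Int), Dom_count_effective_moduli D → Pre_count_effective_moduli D → Spec_count_effective_moduli D (count_effective_moduli D)

-- ===== LEMMAS AND PROOFS =====

abbrev pvGood (n : Nat) : Prop := ∀ p ∈ n.primeFactorsList, p % 47 = 1

theorem pvGood_iff (n : Nat) (hn : n ≠ 0) : pvGood n ↔ ∀ p, p.Prime → p ∣ n → p % 47 = 1 := by
  unfold pvGood
  constructor
  · intro h p hp hd
    exact h p ((Nat.mem_primeFactorsList hn).mpr ⟨hp, hd⟩)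
  · intro h p hm
    exact h p (Nat.prime_of_mem_primeFactorsList hm) (Nat.dvd_of_mem_primeFactorsList hm)

theorem pvGood_step (n : Nat) (hn : 2 ≤ n) :
    pvGood n ↔ (n.minFac % 47 = 1 ∧ pvGood (n / n.minFac)) := by
  have hn0 : n ≠ 0 := by omega
  have hmp : n.minFac.Prime := Nat.minFac_prime (by omega)
  have hmd : n.minFac ∣ n := Nat.minFac_dvd n
  have hq0 : n / n.minFac ≠ 0 := by
    have := Nat.div_pos (Nat.le_of_dvd (by omega) hmd) hmp.pos
    omega
  rw [pvGood_iff n hn0, pvGood_iff _ hq0]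
  constructor
  · intro h
    refine ⟨h _ hmp hmd, fun p hp hd => h p hp (hd.trans (Nat.div_dvd_of_dvd hmd))⟩
  · rintro ⟨h1, h2⟩ p hp hd
    have hsplit : p ∣ n.minFac ∨ p ∣ n / n.minFac := by
      have : p ∣ n.minFac * (n / n.minFac) := by rwa [Nat.mul_div_cancel' hmd]
      exact (Nat.Prime.dvd_mul hp).mp this
    rcases hsplit with h | h
    · rwa [(Nat.prime_dvd_prime_iff_eq hp hmp).mp h]
    · exact h2 p hp h

theorem pv_minFac_eq (q d : Int) (hd : 2 ≤ d) (hq : 1 ≤ q) (hdvd : d ∣ q)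
    (hmin : ∀ k : Int, 2 ≤ k → k < d → ¬ k ∣ q) : q.toNat.minFac = d.toNat := by
  have hdq : d ≤ q := Int.le_of_dvd (by omega) hdvd
  have hcast_q : (q.toNat : Int) = q := Int.toNat_of_nonneg (by omega)
  have hcast_d : (d.toNat : Int) = d := Int.toNat_of_nonneg (by omega)
  have hdvdN : d.toNat ∣ q.toNat := by
    rw [← Int.natCast_dvd_natCast, hcast_q, hcast_d]; exact hdvd
  have h1 : q.toNat.minFac ≤ d.toNat := Nat.minFac_le_of_dvd (by omega) hdvdN
  rcases Nat.lt_or_ge q.toNat.minFac d.toNat with h | h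
  · exfalso
    have hp := Nat.minFac_prime (show q.toNat ≠ 1 by omega)
    have h2 : (2:Nat) ≤ q.toNat.minFac := hp.two_le
    have h3 : (q.toNat.minFac : Int) ∣ q := by
      rw [← hcast_q]
      exact_mod_cast Nat.minFac_dvd q.toNat
    exact hmin _ (by exact_mod_cast h2) (by omega) h3
  · omega

theorem pv_effLoop_eq (q d : Int) : 2 ≤ d → 1 ≤ q →
    (∀ k : Int, 2 ≤ k → k < d → ¬ k ∣ q) → effLoop q d = decide (pvGood q.toNat) := by
  induction q, d using effLoop.induct with
  | case1 q d hg hmod hbad =>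
    intro hd hq hmin
    rw [effLoop]
    rw [dif_pos hg, if_pos hmod, if_pos hbad]
    rw [PySem.Int.mod_eq_zero_iff_dvd] at hmod
    have hfac := pv_minFac_eq q d hd hq hmod hmin
    have hqn : 2 ≤ q.toNat := by
      have := Int.le_of_dvd (by omega) hmod
      omega
    symm
    rw [decide_eq_false_iff_not]
    rw [pvGood_step _ hqn, hfac]
    rw [PySem.Int.mod_eq_emod_of_pos (by omega)] at hbad
    intro hc
    omega
  | case2 q d hg hmod hgood ih =>
    intro hd hq hmin
    rw [effLoop]
    rw [dif_pos hg, if_pos hmod, if_neg hgood]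
    obtain ⟨hd2, hq1, hdd⟩ := hg
    rw [PySem.Int.mod_eq_zero_iff_dvd] at hmod
    have hfd : PySem.Int.floordiv q d = q / d := PySem.Int.floordiv_eq_ediv_of_pos (by omega)
    have hmul : q / d * d = q := Int.ediv_mul_cancel hmod
    have hq' : 1 ≤ q / d := by
      by_contra hc
      push Not at hc
      nlinarith
    have hdvd' : q / d ∣ q := ⟨d, hmul.symm⟩
    rw [hfd] at ih ⊢
    rw [ih hd hq' (fun k h2 hk hdv => hmin k h2 hk (hdv.trans hdvd'))]
    rw [decide_eq_decide]
    have hfac := pv_minFac_eq q d hd hq hmod hmin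
    have hqn : 2 ≤ q.toNat := by
      have := Int.le_of_dvd (by omega) hmod
      omega
    have htn : (q / d).toNat = q.toNat / d.toNat := by
      have hcast_q : (q.toNat : Int) = q := Int.toNat_of_nonneg (by omega)
      have hcast_d : (d.toNat : Int) = d := Int.toNat_of_nonneg (by omega)
      rw [← hcast_q, ← hcast_d, ← Int.natCast_div]
      exact Int.toNat_natCast _
    rw [htn, pvGood_step _ hqn, hfac]
    rw [PySem.Int.mod_eq_emod_of_pos (by omega)] at hgood
    have : d.toNat % 47 = 1 := by omega
    tauto
  | case3 q d hg hmod ih =>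
    intro hd hq hmin
    rw [effLoop]
    rw [dif_pos hg, if_neg hmod]
    refine ih (by omega) hq (fun k h2 hk hdv => ?_)
    rcases eq_or_lt_of_le (show k ≤ d by omega) with he | hlt
    · subst he
      rw [PySem.Int.mod_eq_zero_iff_dvd] at hmod
      exact hmod hdv
    · exact hmin k h2 hlt hdv
  | case4 q d hg =>
    intro hd hq hmin
    rw [effLoop]
    rw [dif_neg hg]
    have hddq : q < d * d := by
      by_contra hc
      exact hg ⟨hd, hq, by omega⟩
    rcases eq_or_lt_of_le hq with he | hq2
    · -- q = 1
      rw [← he]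
      simp [pvGood]
    · -- q ≥ 2 : q.toNat is prime
      have hqn2 : 2 ≤ q.toNat := by omega
      have hprime : q.toNat.Prime := by
        rw [Nat.prime_def_le_sqrt]
        refine ⟨hqn2, fun m h2 hms hdvd => ?_⟩
        have hmm : m * m ≤ q.toNat := Nat.le_sqrt.mp hms
        rcases Nat.lt_or_ge m d.toNat with h | h
        · refine hmin (m : Int) (by exact_mod_cast h2) (by omega) ?_
          have : (m:Int) ∣ (q.toNat : Int) := by exact_mod_cast hdvd
          rwa [Int.toNat_of_nonneg (by omega)] at this
        · have : d.toNat * d.toNat ≤ m * m := Nat.mul_le_mul h h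
          have hcd : (d.toNat : Int) = d := Int.toNat_of_nonneg (by omega)
          have : (q:Int) < (m:Int) * m := by
            calc (q:Int) < d * d := hddq
            _ ≤ (m:Int) * m := by rw [← hcd]; exact_mod_cast Nat.mul_le_mul h h
          have : (q.toNat : Int) < (m*m : Nat) := by push_cast; rwa [Int.toNat_of_nonneg (by omega)]
          omega
      have hfl : q.toNat.primeFactorsList = [q.toNat] := Nat.primeFactorsList_prime hprime
      simp only [pvGood, hfl, List.mem_singleton, forall_eq]
      have hne : (q == (1:Int)) = false := by rw [beq_eq_false_iff_ne]; omega
      rw [hne, Bool.false_or]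
      rw [PySem.Int.mod_eq_emod_of_pos (by omega)]
      rw [Bool.eq_iff_iff]
      simp only [beq_iff_eq, decide_eq_true_eq]
      omega

-- toList bridges for the Array Bool state
theorem pvSet_toList (a : Array Bool) (i : Int) (v : Bool) :
    (pvSet a i v).toList = a.toList.set i.toNat v := Array.toList_setIfInBounds

theorem pvGet_toList (a : Array Bool) (i : Int) :
    pvGet a i = a.toList.getD i.toNat false := by
  unfold pvGet
  rw [Array.getD_eq_getD_getElem?, List.getD_eq_getElem?_getD, Array.getElem?_toList]

theorem pv_fold_toList (R : List Int) (f : Array Bool → Int → Array Bool)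
    (g : List Bool → Int → List Bool) (h : ∀ a x, (f a x).toList = g a.toList x)
    (a : Array Bool) : (R.foldl f a).toList = R.foldl g a.toList := by
  induction R generalizing a with
  | nil => rfl
  | cons x R ih => rw [List.foldl_cons, List.foldl_cons, ih, h]

-- marking a list of indices false: pointwise effect on the array
theorem pv_mark_getD (R : List Int) (l : List Bool) (k : Nat) :
    (R.foldl (fun l' j => l'.set j.toNat false) l).getD k false
      = (l.getD k false && !(R.any (fun j => j.toNat == k))) := by
  induction R generalizing l with
  | nil => simp
  | cons j R ih =>
    rw [List.foldl_cons, ih]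
    rw [List.any_cons]
    by_cases hk : j.toNat = k
    · subst hk
      have hset : (l.set j.toNat false).getD j.toNat false = false := by
        rw [List.getD_eq_getElem?_getD, List.getElem?_set, if_pos rfl]
        split <;> simp
      rw [hset]
      simp
    · have hset : (l.set j.toNat false).getD k false = l.getD k false := by
        rw [List.getD_eq_getElem?_getD, List.getElem?_set, if_neg hk, ← List.getD_eq_getElem?_getD]
      rw [hset]
      have : (j.toNat == k) = false := by simp [hk]
      simp [this]

theorem pv_mark_length (R : List Int) (l : List Bool) :
    (R.foldl (fun l' j => l'.set j.toNat false) l).length = l.length := by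
  induction R generalizing l with
  | nil => rfl
  | cons j R ih => rw [List.foldl_cons, ih, List.length_set]

theorem pv_init2_getD (m k : Nat) :
    (((List.replicate m true).set 0 false).set 1 false).getD k false
      = decide (2 ≤ k ∧ k < m) := by
  rw [List.getD_eq_getElem?_getD, List.getElem?_set, List.getElem?_set]
  simp only [List.length_set, List.length_replicate, List.getElem?_replicate]
  split_ifs <;> simp_all <;> omega

theorem pv_init1_getD (m k : Nat) :
    ((List.replicate m true).set 0 false).getD k false = decide (1 ≤ k ∧ k < m) := by
  rw [List.getD_eq_getElem?_getD, List.getElem?_set]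
  simp only [List.length_replicate, List.getElem?_replicate]
  split_ifs <;> simp_all
  omega

-- the sieve's boolean array after the outer loop has processed i = 2 .. t-1
def pvSieveFold (n t : Int) : List Bool :=
  (PySem.List.pyRange 2 t 1).foldl
    (fun l i =>
      if l.getD i.toNat false then
        (PySem.List.pyRange (i * i) (n + 1) i).foldl
          (fun l' j => l'.set j.toNat false) l
      else l)
    (((List.replicate (n + 1).toNat true).set 0 false).set 1 false)

-- what entry k of that array means: k ∈ [2,n] with no divisor d < t, d² ≤ k
-- Bool meaning of entry k of the sieve array after the outer loop has run for i < t: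
-- k ∈ [2, nn] and no divisor d < t with d² ≤ k
def pvPb (nn : Nat) (t : Int) (k : Nat) : Bool :=
  decide (2 ≤ k) && decide (k ≤ nn) &&
    ((List.range t.toNat).all fun d => !(decide (2 ≤ d ∧ d ∣ k ∧ d * d ≤ k)))

theorem pvPb_iff (nn : Nat) (t : Int) (k : Nat) :
    pvPb nn t k = true ↔
      (2 ≤ k ∧ k ≤ nn ∧ ∀ d : Nat, 2 ≤ d → (d : Int) < t → ¬(d ∣ k ∧ d * d ≤ k)) := by
  unfold pvPb
  simp only [Bool.and_eq_true, List.all_eq_true, decide_eq_true_eq, Bool.not_eq_true',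
    decide_eq_false_iff_not, List.mem_range]
  constructor
  · rintro ⟨⟨h1, h2⟩, h3⟩
    exact ⟨h1, h2, fun d hd hdt hc => h3 d (by omega) ⟨hd, hc.1, hc.2⟩⟩
  · rintro ⟨h1, h2, h3⟩
    exact ⟨⟨h1, h2⟩, fun d hdt hc => h3 d hc.1 (by omega) ⟨hc.2.1, hc.2.2⟩⟩

-- membership of the inner marking range, as a statement about a Nat index k
theorem pv_inner_any (n i : Int) (hi : 2 ≤ i) (k : Nat) :
    ((PySem.List.pyRange (i * i) (n + 1) i).any (fun j => j.toNat == k))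
      = decide (i ∣ (k : Int) ∧ i * i ≤ (k : Int) ∧ (k : Int) ≤ n) := by
  rw [Bool.eq_iff_iff, List.any_eq_true, decide_eq_true_eq]
  constructor
  · rintro ⟨j, hj, hjk⟩
    rw [PySem.List.mem_pyRange_iff_of_pos (by omega)] at hj
    obtain ⟨h1, h2, h3⟩ := hj
    have hj0 : 0 ≤ j := le_trans (by nlinarith) h1
    have hjq : j = (k : Int) := by
      rw [beq_iff_eq] at hjk
      omega
    subst hjq
    refine ⟨?_, h1, by omega⟩
    obtain ⟨c, hc⟩ := h3
    exact ⟨i + c, by linarith [hc]⟩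
  · rintro ⟨h1, h2, h3⟩
    refine ⟨(k : Int), ?_, by simp⟩
    rw [PySem.List.mem_pyRange_iff_of_pos (by omega)]
    refine ⟨h2, by omega, ?_⟩
    obtain ⟨c, hc⟩ := h1
    exact ⟨c - i, by rw [Int.mul_sub, ← hc]⟩

theorem pv_sieve_inv (n : Int) (hn : 1 ≤ n) (m : Nat) :
    ∀ k : Nat, (pvSieveFold n (2 + m)).getD k false = pvPb n.toNat (2 + m) k := by
  induction m with
  | zero =>
    intro k
    simp only [Nat.cast_zero, add_zero]
    unfold pvSieveFold
    rw [PySem.List.pyRange_one_eq_nil (by omega), List.foldl_nil]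
    rw [pv_init2_getD]
    rw [Bool.eq_iff_iff, decide_eq_true_eq, pvPb_iff]
    constructor
    · rintro ⟨h1, h2⟩
      exact ⟨h1, by omega, fun d hd hdt => by omega⟩
    · rintro ⟨h1, h2, _⟩
      omega
  | succ m ih =>
    intro k
    simp only [Nat.cast_add, Nat.cast_one]
    have hstep : pvSieveFold n (2 + (m + 1)) =
        (if (pvSieveFold n (2 + m)).getD ((2 + (m:Int)).toNat) false then
          (PySem.List.pyRange ((2 + (m:Int)) * (2 + (m:Int))) (n + 1) (2 + (m:Int))).foldl
            (fun l' j => l'.set j.toNat false) (pvSieveFold n (2 + m))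
        else pvSieveFold n (2 + m)) := by
      unfold pvSieveFold
      rw [show ((2:Int) + ((m:Nat) + 1)) = (2 + (m:Int)) + 1 by ring,
        PySem.List.pyRange_one_succ_right (by omega), List.foldl_append, List.foldl_cons,
        List.foldl_nil]
    rw [hstep]
    have hread : (pvSieveFold n (2 + (m:Int))).getD ((2 + (m:Int)).toNat) false
        = pvPb n.toNat (2 + m) (2 + m) := by
      rw [show ((2:Int) + (m:Int)).toNat = 2 + m by omega]
      rw [ih (2 + m)]
    by_cases hP : pvPb n.toNat (2 + (m:Int)) (2 + m) = true
    · rw [hread, if_pos hP]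
      rw [pv_mark_getD]
      rw [ih k, pv_inner_any n _ (by omega) k]
      rw [Bool.eq_iff_iff, Bool.and_eq_true, Bool.not_eq_true', decide_eq_false_iff_not,
        pvPb_iff, pvPb_iff]
      constructor
      · rintro ⟨h1, h2⟩
        obtain ⟨hk2, hkn, hall⟩ := h1
        refine ⟨hk2, hkn, fun d hd hdt hdk => ?_⟩
        rcases Nat.lt_or_ge d (2 + m) with hlt | hge
        · exact hall d hd (by omega) hdk
        · have hdm : d = 2 + m := by omega
          subst hdm
          refine h2 ⟨?_, ?_, ?_⟩
          · obtain ⟨c, hc⟩ := hdk.1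
            exact ⟨(c : Int), by rw [hc]; push_cast; ring⟩
          · have h := hdk.2
            have h' : (((2 + m) * (2 + m) : Nat) : Int) ≤ (k : Int) := by exact_mod_cast h
            push_cast at h' ⊢
            omega
          · omega
      · rintro ⟨hk2, hkn, hall⟩
        refine ⟨⟨hk2, hkn, fun d hd hdt hdk => hall d hd (by omega) hdk⟩, ?_⟩
        rintro ⟨hdvd, hsq, hkn'⟩
        refine hall (2 + m) (by omega) (by push_cast; omega) ⟨?_, ?_⟩
        · obtain ⟨c, hc⟩ := hdvd
          have hc0 : 0 ≤ c := by nlinarith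
          have hc' : c = (c.toNat : Int) := by omega
          refine ⟨c.toNat, ?_⟩
          have hgoal : (k : Int) = (((2 + m) * c.toNat : Nat) : Int) := by
            push_cast
            rw [hc, ← hc']
          exact_mod_cast hgoal
        · have : ((2 + m) * (2 + m) : Int) = (((2+m) * (2+m) : Nat) : Int) := by push_cast; ring
          omega
    · rw [hread, if_neg hP]
      rw [ih k]
      rw [pvPb_iff] at hP
      rw [Bool.eq_iff_iff, pvPb_iff, pvPb_iff]
      push Not at hP
      constructor
      · rintro ⟨hk2, hkn, hall⟩
        refine ⟨hk2, hkn, fun d hd hdt hdk => ?_⟩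
        rcases Nat.lt_or_ge d (2 + m) with hlt | hge
        · exact hall d hd (by omega) hdk
        · have hdm : d = 2 + m := by omega
          subst hdm
          -- the skipped i = 2+m is composite (or > n): find its small divisor
          rcases Nat.lt_or_ge n.toNat (2 + m) with hbig | hle
          · have : 2 + m ≤ k := Nat.le_of_dvd (by omega) hdk.1
            omega
          · obtain ⟨d0, hd0, hd0t, hd0dvd, hd0sq⟩ := hP (by omega) hle
            exact hall d0 hd0 hd0t ⟨hd0dvd.trans hdk.1, by nlinarith [hdk.2]⟩
      · rintro ⟨hk2, hkn, hall⟩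
        exact ⟨hk2, hkn, fun d hd hdt hdk => hall d hd (by omega) hdk⟩

theorem pv_prime_iff (nn : Nat) (k : Nat) :
    (2 ≤ k ∧ k ≤ nn ∧
        ∀ d : Nat, 2 ≤ d → (d : Int) < (Nat.sqrt nn : Int) + 1 → ¬(d ∣ k ∧ d * d ≤ k))
      ↔ (k ≤ nn ∧ k.Prime) := by
  constructor
  · rintro ⟨h2, hle, hall⟩
    refine ⟨hle, ?_⟩
    rw [Nat.prime_def_le_sqrt]
    refine ⟨h2, fun m hm hms hdvd => ?_⟩
    have hmm : m * m ≤ k := Nat.le_sqrt.mp hms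
    have hmsn : m ≤ Nat.sqrt nn := le_trans hms (Nat.sqrt_le_sqrt hle)
    exact hall m hm (by omega) ⟨hdvd, hmm⟩
  · rintro ⟨hle, hp⟩
    refine ⟨hp.two_le, hle, fun d hd _ hdk => ?_⟩
    obtain ⟨hdvd, hsq⟩ := hdk
    rcases (Nat.Prime.eq_one_or_self_of_dvd hp d hdvd) with h | h
    · omega
    · subst h
      nlinarith [hp.two_le]

theorem pv_mem_sieve (n : Int) (hn : 1 ≤ n) (p : Int) :
    p ∈ sieve_primes n ↔ 2 ≤ p ∧ p ≤ n ∧ p.toNat.Prime := by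
  have hs1 : 1 ≤ Nat.sqrt n.toNat := Nat.sqrt_pos.mpr (by omega)
  have harg : pvIsqrt n + 1 = 2 + ((Nat.sqrt n.toNat - 1 : Nat) : Int) := by
    unfold pvIsqrt
    omega
  unfold sieve_primes
  dsimp only
  rw [List.mem_filter]
  have harr : ((PySem.List.pyRange 2 (pvIsqrt n + 1) 1).foldl
      (fun l i =>
        if pvGet l i then
          (PySem.List.pyRange (i * i) (n + 1) i).foldl
            (fun l' j => pvSet l' j false) l
        else l)
      (pvSet (pvSet (Array.replicate (n + 1).toNat true) 0 false) 1 false)).toList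
      = pvSieveFold n (2 + ((Nat.sqrt n.toNat - 1 : Nat) : Int)) := by
    rw [pv_fold_toList _ _
      (fun l i =>
        if l.getD i.toNat false then
          (PySem.List.pyRange (i * i) (n + 1) i).foldl
            (fun l' j => l'.set j.toNat false) l
        else l)
      (fun a x => by
        dsimp only
        rw [pvGet_toList]
        split_ifs
        · exact pv_fold_toList _ (fun a' j => pvSet a' j false)
            (fun l' j => l'.set j.toNat false) (fun a' j => pvSet_toList a' j false) a
        · rfl)]
    rw [pvSet_toList, pvSet_toList, Array.toList_replicate]
    rw [← harg]
    rfl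
  rw [PySem.List.mem_pyRange_one]
  constructor
  · rintro ⟨⟨h2, hlt⟩, hget⟩
    rw [pvGet_toList, harr, pv_sieve_inv n hn] at hget
    rw [pvPb_iff] at hget
    rw [show (2 + ((Nat.sqrt n.toNat - 1 : Nat) : Int)) = ((Nat.sqrt n.toNat : Int) + 1) by omega] at hget
    rw [pv_prime_iff] at hget
    exact ⟨h2, by omega, hget.2⟩
  · rintro ⟨h2, hle, hp⟩
    refine ⟨⟨h2, by omega⟩, ?_⟩
    rw [pvGet_toList, harr, pv_sieve_inv n hn]
    rw [pvPb_iff]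
    rw [show (2 + ((Nat.sqrt n.toNat - 1 : Nat) : Int)) = ((Nat.sqrt n.toNat : Int) + 1) by omega]
    rw [pv_prime_iff]
    exact ⟨by omega, hp⟩

theorem pv_range_any (D p : Int) (hp : 2 ≤ p) (k : Nat) :
    ((PySem.List.pyRange p (D + 1) p).any (fun m => m.toNat == k))
      = decide (p ∣ (k : Int) ∧ p ≤ (k : Int) ∧ (k : Int) ≤ D) := by
  rw [Bool.eq_iff_iff, List.any_eq_true, decide_eq_true_eq]
  constructor
  · rintro ⟨j, hj, hjk⟩
    rw [PySem.List.mem_pyRange_iff_of_pos (by omega)] at hj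
    obtain ⟨h1, h2, h3⟩ := hj
    have hjq : j = (k : Int) := by
      rw [beq_iff_eq] at hjk
      omega
    subst hjq
    refine ⟨?_, h1, by omega⟩
    obtain ⟨c, hc⟩ := h3
    exact ⟨1 + c, by linarith [hc]⟩
  · rintro ⟨h1, h2, h3⟩
    refine ⟨(k : Int), ?_, by simp⟩
    rw [PySem.List.mem_pyRange_iff_of_pos (by omega)]
    refine ⟨h2, by omega, ?_⟩
    obtain ⟨c, hc⟩ := h1
    exact ⟨c - 1, by rw [Int.mul_sub, ← hc]; ring⟩

theorem pv_markAll_getD (D : Int) (ps : List Int) (l : List Bool) (k : Nat)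
    (hp : ∀ p ∈ ps, 2 ≤ p) :
    (ps.foldl (fun l' p =>
        if PySem.Int.mod (p - 1) 47 ≠ 0 then
          (PySem.List.pyRange p (D + 1) p).foldl
            (fun l'' m => l''.set m.toNat false) l'
        else l') l).getD k false
      = (l.getD k false &&
          !(ps.any (fun p => decide (¬ PySem.Int.mod (p - 1) 47 = 0) &&
              decide (p ∣ (k : Int) ∧ p ≤ (k : Int) ∧ (k : Int) ≤ D)))) := by
  induction ps generalizing l with
  | nil => simp
  | cons p ps ih =>
    have hp2 : (2:Int) ≤ p := hp p (by simp)
    rw [List.foldl_cons, List.any_cons]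
    by_cases hbad : PySem.Int.mod (p - 1) 47 = 0
    · have hb2 : (47:Int) ∣ p - 1 := (PySem.Int.mod_eq_zero_iff_dvd _ _).mp hbad
      rw [if_neg (by simp [hb2]), ih _ (fun x hx => hp x (by simp [hx]))]
      simp [hb2]
    · have hb2 : ¬ (47:Int) ∣ p - 1 := fun hc => hbad ((PySem.Int.mod_eq_zero_iff_dvd _ _).mpr hc)
      rw [if_pos (by simp [hb2]), ih _ (fun x hx => hp x (by simp [hx]))]
      rw [pv_mark_getD]
      rw [pv_range_any D p hp2 k]
      simp [hb2, Bool.and_assoc]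

theorem pv_markAll_length (D : Int) (ps : List Int) (l : List Bool) :
    (ps.foldl (fun l' p =>
        if PySem.Int.mod (p - 1) 47 ≠ 0 then
          (PySem.List.pyRange p (D + 1) p).foldl
            (fun l'' m => l''.set m.toNat false) l'
        else l') l).length = l.length := by
  induction ps generalizing l with
  | nil => rfl
  | cons p ps ih =>
    rw [List.foldl_cons, ih]
    split
    · rw [pv_mark_length]
    · rfl

theorem pv_countP_getD (l : List Bool) :
    l.countP (fun b => b) = (List.range l.length).countP (fun k => l.getD k false) := by
  conv_lhs => rw [show l = (List.range l.length).map (fun k => l.getD k false) by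
    refine List.ext_getElem (by simp) (fun i h1 h2 => ?_)
    simp only [List.getElem_map, List.getElem_range]
    rw [List.getD_eq_getElem?_getD, List.getElem?_eq_getElem (by simpa using h1)]
    rfl]
  rw [List.countP_map]
  rfl

theorem pv_B_count (D : Int) :
    count_effective_moduli_alt D
      = ((List.range D.toNat).countP (fun k => decide (pvGood (k + 1))) : Int) := by
  unfold count_effective_moduli_alt
  rw [PySem.List.foldl_if_add_one (p := fun q => effective q)]
  rw [PySem.List.pyRange_one]
  rw [show (D + 1 - 1) = D by ring]
  rw [List.countP_map]
  rw [zero_add]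
  congr 1
  refine List.countP_congr (fun k hk => ?_)
  have heff : effective (1 + (k:Int)) = decide (pvGood (k + 1)) := by
    unfold effective
    rw [pv_effLoop_eq (1 + (k:Int)) 2 (by omega) (by omega) (fun j h2 hj => by omega)]
    rw [decide_eq_decide]
    rw [show ((1:Int) + (k:Int)).toNat = k + 1 by omega]
  simp only [Function.comp_apply, heff]

theorem pv_A_getD (D : Int) (hD : 1 ≤ D) (k : Nat) :
    ((sieve_primes D).foldl (fun l p =>
        if PySem.Int.mod (p - 1) 47 ≠ 0 then
          (PySem.List.pyRange p (D + 1) p).foldl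
            (fun l' m => l'.set m.toNat false) l
        else l)
      ((List.replicate (D + 1).toNat true).set 0 false)).getD k false
      = decide (1 ≤ k ∧ k ≤ D.toNat ∧ pvGood k) := by
  rw [pv_markAll_getD D _ _ k (fun p hp => ((pv_mem_sieve D hD p).mp hp).1)]
  rw [pv_init1_getD]
  rw [Bool.eq_iff_iff, Bool.and_eq_true, decide_eq_true_eq, decide_eq_true_eq,
    Bool.not_eq_true', Bool.eq_false_iff, Ne, List.any_eq_true]
  have hM : (D + 1).toNat = D.toNat + 1 := by omega
  rw [hM]
  constructor
  · rintro ⟨⟨hk1, hkM⟩, hno⟩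
    refine ⟨hk1, by omega, ?_⟩
    rw [pvGood_iff k (by omega)]
    intro q hq hdvd
    by_contra hq47
    have hqle : q ≤ k := Nat.le_of_dvd (by omega) hdvd
    refine hno ⟨(q : Int), ?_, ?_⟩
    · rw [pv_mem_sieve D hD]
      refine ⟨by exact_mod_cast hq.two_le, by omega, by simpa using hq⟩
    · rw [Bool.and_eq_true, decide_eq_true_eq, decide_eq_true_eq]
      have h2q : 2 ≤ q := hq.two_le
      refine ⟨?_, by exact_mod_cast hdvd, by omega, by omega⟩
      rw [PySem.Int.mod_eq_emod_of_pos (by norm_num)]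
      omega
  · rintro ⟨hk1, hkD, hgood⟩
    refine ⟨⟨hk1, by omega⟩, ?_⟩
    rintro ⟨p, hmem, hpred⟩
    rw [Bool.and_eq_true, decide_eq_true_eq, decide_eq_true_eq] at hpred
    obtain ⟨hp47, hdvd, hple, hkd⟩ := hpred
    rw [pv_mem_sieve D hD] at hmem
    obtain ⟨hp2, hpD, hprime⟩ := hmem
    have hcast : ((p.toNat : Nat) : Int) = p := Int.toNat_of_nonneg (by omega)
    have hdvdN : p.toNat ∣ k := by
      rw [← Int.natCast_dvd_natCast, hcast]
      exact hdvd
    have h47 : p.toNat % 47 = 1 := (pvGood_iff k (by omega)).mp hgood _ hprime hdvdN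
    rw [PySem.Int.mod_eq_emod_of_pos (by norm_num)] at hp47
    omega

theorem pv_A_count (D : Int) (hD : 1 ≤ D) :
    count_effective_moduli D
      = ((List.range D.toNat).countP (fun k => decide (pvGood (k + 1))) : Int) := by
  unfold count_effective_moduli
  dsimp only
  rw [← Array.foldl_toList]
  have harr : ((sieve_primes D).foldl (fun l p =>
      if PySem.Int.mod (p - 1) 47 ≠ 0 then
        (PySem.List.pyRange p (D + 1) p).foldl
          (fun l' m => pvSet l' m false) l
      else l)
      (pvSet (Array.replicate (D + 1).toNat true) 0 false)).toList
      = ((sieve_primes D).foldl (fun l p =>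
        if PySem.Int.mod (p - 1) 47 ≠ 0 then
          (PySem.List.pyRange p (D + 1) p).foldl
            (fun l' m => l'.set m.toNat false) l
        else l)
      ((List.replicate (D + 1).toNat true).set 0 false)) := by
    rw [pv_fold_toList _ _
      (fun l p =>
        if PySem.Int.mod (p - 1) 47 ≠ 0 then
          (PySem.List.pyRange p (D + 1) p).foldl
            (fun l' m => l'.set m.toNat false) l
        else l)
      (fun a x => by
        dsimp only
        split_ifs
        · exact pv_fold_toList _ (fun a' m => pvSet a' m false)
            (fun l' m => l'.set m.toNat false) (fun a' j => pvSet_toList a' j false) a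
        · rfl)]
    rw [pvSet_toList, Array.toList_replicate]
    rfl
  rw [harr]
  rw [PySem.List.foldl_add _ (fun b => if b = true then (1:Int) else 0)]
  rw [PySem.List.sum_map_ite_one_zero (p := fun b => b)]
  rw [zero_add]
  congr 1
  rw [pv_countP_getD]
  have hlen : (List.foldl (fun l p =>
      if PySem.Int.mod (p - 1) 47 ≠ 0 then
        List.foldl (fun l' m => l'.set m.toNat false) l (PySem.List.pyRange p (D + 1) p)
      else l)
      ((List.replicate (D + 1).toNat true).set 0 false) (sieve_primes D)).length
      = D.toNat + 1 := by
    rw [pv_markAll_length, List.length_set, List.length_replicate]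
    omega
  rw [hlen]
  have hgetD : ∀ k : Nat, (List.foldl (fun l p =>
      if PySem.Int.mod (p - 1) 47 ≠ 0 then
        List.foldl (fun l' m => l'.set m.toNat false) l (PySem.List.pyRange p (D + 1) p)
      else l)
      ((List.replicate (D + 1).toNat true).set 0 false) (sieve_primes D)).getD k false
      = decide (1 ≤ k ∧ k ≤ D.toNat ∧ pvGood k) := fun k => pv_A_getD D hD k
  rw [List.countP_congr (fun k _ => by rw [hgetD k])]
  rw [List.range_succ_eq_map, List.countP_cons]
  rw [List.countP_map]
  have h0 : (decide (1 ≤ 0 ∧ 0 ≤ D.toNat ∧ pvGood 0)) = false := by simp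
  rw [h0, if_neg (by simp), add_zero]
  refine List.countP_congr (fun k hk => ?_)
  rw [List.mem_range] at hk
  simp only [Function.comp_apply, Nat.succ_eq_add_one, decide_eq_true_eq]
  constructor
  · rintro ⟨_, _, hg⟩
    exact hg
  · intro hg
    exact ⟨by omega, by omega, hg⟩

-- ===== VERDICT (by name: the statement is the Claim_ definition above) =====
theorem count_effective_moduli_spec : Claim_equal_count_effective_moduli := by
  intro D _ hPre
  unfold Spec_count_effective_moduli
  rw [pv_A_count D hPre, pv_B_count D]
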